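-- pv_equiv track=rewrite | github.com/code-study-classes/python-basics-jop221 | practice_package/strings.py | count_vowel_groups
-- ===== SOURCE A (Python) =====
-- def count_vowel_groups(word):
--     vowels = set('aeiouAEIOU')  # Exclude 'y' as vowel
--     count = 0
--     prev_is_vowel = False
--     for ch in word:
--         is_vowel = ch in vowels
--         if is_vowel and not prev_is_vowel:
--             count += 1
--         prev_is_vowel = is_vowel
--     return count
-- ===== SOURCE B (Python) =====
-- import re
--
-- _VOWEL_RUN = re.compile(r'[aeiouAEIOU]+')
--
-- def count_vowel_groups(word):
--     return len(_VOWEL_RUN.findall(word))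
-- ===== Notes on version B (the rewrite author's own statement) =====
-- stated objective: idiomatic
-- what changed: Replaces A's manual previous-character state machine with a regex run-counter: len(re.findall(r'[aeiouAEIOU]+', word)) counts maximal vowel runs directly.
import Mathlib
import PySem

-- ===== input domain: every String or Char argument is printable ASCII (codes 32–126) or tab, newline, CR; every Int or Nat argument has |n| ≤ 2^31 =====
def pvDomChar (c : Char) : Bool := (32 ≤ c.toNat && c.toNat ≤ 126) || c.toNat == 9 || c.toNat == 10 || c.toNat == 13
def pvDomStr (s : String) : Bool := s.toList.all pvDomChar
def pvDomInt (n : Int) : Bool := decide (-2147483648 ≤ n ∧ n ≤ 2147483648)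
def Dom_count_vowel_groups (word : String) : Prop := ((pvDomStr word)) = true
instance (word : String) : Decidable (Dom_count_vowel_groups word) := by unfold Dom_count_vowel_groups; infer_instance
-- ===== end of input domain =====

-- B counts maximal vowel runs via a regex scan (len(re.findall(r'[aeiouAEIOU]+', word)));
-- A keeps a previous-character flag. Return values proved equal on all strings.

-- ===== PORT A =====
-- 'ch in vowels' with vowels = set('aeiouAEIOU')
def pvIsVowel (c : Char) : Bool :=
  (PySem.Set.ofList "aeiouAEIOU".toList).contains c

def count_vowel_groups (word : String) : Int :=
  (word.toList.foldl
    (fun (st : Int × Bool) ch =>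
      let is_vowel := pvIsVowel ch
      (if is_vowel && !st.2 then st.1 + 1 else st.1, is_vowel))
    (0, false)).1

-- ===== PORT B =====
-- regex scan for r'[aeiouAEIOU]+': skip non-vowels; at a vowel, consume the
-- maximal vowel run as one match and continue after it.
def pvFindRuns : List Char → Int
  | [] => 0
  | c :: rest =>
    if pvIsVowel c then 1 + pvFindRuns (rest.dropWhile pvIsVowel)
    else pvFindRuns rest
termination_by l => l.length
decreasing_by
  · simp only [List.length_cons]
    exact Nat.lt_succ_of_le (List.length_dropWhile_le _ _)
  · simp

def count_vowel_groups_alt (word : String) : Int :=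
  pvFindRuns word.toList

-- ===== PRECONDITION & SPEC =====
def Spec_count_vowel_groups (word : String) (out : Int) : Prop := out = count_vowel_groups_alt word
instance (word : String) (out : Int) : Decidable (Spec_count_vowel_groups word out) := by unfold Spec_count_vowel_groups; infer_instance

-- ===== CLAIM (what is proved, stated in full; the proofs are below) =====
def Claim_equal_count_vowel_groups : Prop := ∀ (word : String), Dom_count_vowel_groups word → Spec_count_vowel_groups word (count_vowel_groups word)

-- ===== LEMMAS AND PROOFS =====

theorem pvFindRuns_cons_vowel (c : Char) (rest : List Char) (h : pvIsVowel c = true) :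
    pvFindRuns (c :: rest) = 1 + pvFindRuns (rest.dropWhile pvIsVowel) := by
  rw [pvFindRuns]; simp [h]

theorem pvFindRuns_cons_not (c : Char) (rest : List Char) (h : pvIsVowel c = false) :
    pvFindRuns (c :: rest) = pvFindRuns rest := by
  rw [pvFindRuns]; simp [h]

theorem pvFold_eq (l : List Char) : ∀ (cnt : Int) (prev : Bool),
    (l.foldl
      (fun (st : Int × Bool) ch =>
        let is_vowel := pvIsVowel ch
        (if is_vowel && !st.2 then st.1 + 1 else st.1, is_vowel))
      (cnt, prev)).1
    = cnt + (if prev then pvFindRuns (l.dropWhile pvIsVowel) else pvFindRuns l) := by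
  induction l with
  | nil => intro cnt prev; cases prev <;> simp [pvFindRuns]
  | cons c rest ih =>
    intro cnt prev
    by_cases hc : pvIsVowel c = true
    · cases prev with
      | false =>
        rw [List.foldl_cons]
        simp only [hc, Bool.not_false, Bool.and_true, if_true]
        rw [ih, pvFindRuns_cons_vowel c rest hc]
        simp
        ring
      | true =>
        rw [List.foldl_cons]
        simp only [hc, Bool.not_true, Bool.and_false, if_false]
        rw [ih]
        simp [List.dropWhile_cons, hc]
    · simp only [Bool.not_eq_true] at hc
      cases prev with
      | false =>
        rw [List.foldl_cons]
        simp only [hc, Bool.false_and, if_false]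
        rw [ih, pvFindRuns_cons_not c rest hc]
        simp
      | true =>
        rw [List.foldl_cons]
        simp only [hc, Bool.false_and, if_false]
        rw [ih]
        simp [List.dropWhile_cons, hc, pvFindRuns_cons_not c rest hc]

-- ===== VERDICT (by name: the statement is the Claim_ definition above) =====
theorem count_vowel_groups_spec : Claim_equal_count_vowel_groups := by
  intro word _
  unfold Spec_count_vowel_groups count_vowel_groups count_vowel_groups_alt
  rw [pvFold_eq]
  simp
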